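-- pv_equiv track=rewrite | github.com/ebragas/MITX-6.00.1x | Practice/Week 3 - Structured Types/biggest.py | biggest
-- ===== SOURCE A (Python) =====
-- def biggest(aDict):
--     """
--     aDict: A dictionary, where all the values are lists.
--
--     returns: The key with the largest number of values associated with it.
--     """
--     # Alternate dictionary of keys and list lengths
--     len_dict = {}
--     for i in aDict:
--         len_dict[i] = len(aDict[i])
--
--     # Find largest length value
--     val = max(len_dict.values())
--
--     # Find key with same value
--     for i in len_dict:
--         if len_dict[i] == val:
--             return i
-- ===== SOURCE B (Python) =====
-- def biggest(aDict):
--     """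
--     aDict: A dictionary, where all the values are lists.
--
--     returns: The key with the largest number of values associated with it.
--     """
--     best_key = None
--     best_len = -1
--     for k in aDict:
--         n = len(aDict[k])
--         if n > best_len:
--             best_key = k
--             best_len = n
--     if best_key is None:
--         raise ValueError("biggest() arg is an empty dict")
--     return best_key
-- ===== Notes on version B (the rewrite author's own statement) =====
-- stated objective: simpler
-- what changed: Replaced A's auxiliary length-dict, max() over its values and a second scan for the matching key by a single pass keeping a running best key and best length (strict > preserves first-key-wins).
import Mathlib
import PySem

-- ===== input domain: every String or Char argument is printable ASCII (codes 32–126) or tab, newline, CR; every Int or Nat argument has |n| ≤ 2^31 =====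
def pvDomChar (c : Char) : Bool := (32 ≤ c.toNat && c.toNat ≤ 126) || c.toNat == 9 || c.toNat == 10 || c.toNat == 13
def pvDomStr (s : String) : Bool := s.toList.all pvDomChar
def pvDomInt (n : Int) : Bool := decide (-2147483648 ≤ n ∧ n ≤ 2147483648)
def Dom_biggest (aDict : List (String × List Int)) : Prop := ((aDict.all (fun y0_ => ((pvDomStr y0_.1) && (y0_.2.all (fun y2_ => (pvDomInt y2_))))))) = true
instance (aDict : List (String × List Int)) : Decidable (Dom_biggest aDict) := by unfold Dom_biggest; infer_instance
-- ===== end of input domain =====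

-- B replaces A's auxiliary length-dict + max + second scan by a single running-best pass (strict '>' keeps first-key-wins); return values proved equal on nonempty dicts.

-- ===== PORT A =====
def biggest (aDict : List (String × List Int)) : String :=
  let d := PySem.Dict.ofList aDict            -- the dict argument
  -- len_dict = {}; for i in aDict: len_dict[i] = len(aDict[i])
  let lenDict : PySem.Dict String Int :=
    d.keys.foldl (fun ld k => ld.insert k ((d.getD k []).length : Int)) PySem.Dict.empty
  -- val = max(len_dict.values())
  match PySem.List.max? lenDict.values (fun v => v) with
  | none => ""                                -- Python: max() raises ValueError (empty dict; excluded by Pre_)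
  | some val =>
    -- for i in len_dict: if len_dict[i] == val: return i
    match lenDict.keys.find? (fun k => lenDict.getD k 0 == val) with
    | some k => k
    | none => ""                              -- Python would fall off the loop returning None; unreachable, val is in the values

-- ===== PORT B =====
def biggest_alt (aDict : List (String × List Int)) : String :=
  let d := PySem.Dict.ofList aDict            -- the dict argument
  -- best_key = None; best_len = -1; for k in aDict: n = len(aDict[k]); if n > best_len: best_key, best_len = k, n
  let best : Option String × Int :=
    d.keys.foldl (fun acc k =>
      let n : Int := (d.getD k []).length
      if n > acc.2 then (some k, n) else acc) (none, -1)
  -- if best_key is None: raise ValueError (empty dict; excluded by Pre_)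
  best.1.getD ""

-- ===== PRECONDITION & SPEC =====
-- Pre_ excludes only the empty dict, on which both A (max() of an empty sequence) and B raise ValueError.
def Pre_biggest (aDict : List (String × List Int)) : Prop := aDict ≠ []
instance (aDict : List (String × List Int)) : Decidable (Pre_biggest aDict) := by unfold Pre_biggest; infer_instance
def pvWitness_biggest : (List (String × List Int)) := [("a", [1]), ("b", [2, 3])]
def Spec_biggest (aDict : List (String × List Int)) (out : String) : Prop := out = biggest_alt aDict
instance (aDict : List (String × List Int)) (out : String) : Decidable (Spec_biggest aDict out) := by unfold Spec_biggest; infer_instance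

-- ===== CLAIM (what is proved, stated in full; the proofs are below) =====
def Claim_equal_biggest : Prop := ∀ (aDict : List (String × List Int)), Dom_biggest aDict → Pre_biggest aDict → Spec_biggest aDict (biggest aDict)

-- ===== LEMMAS AND PROOFS =====

theorem find?_congr_mem {α : Type} (l : List α) (p q : α → Bool)
    (h : ∀ x ∈ l, p x = q x) : l.find? p = l.find? q := by
  induction l with
  | nil => rfl
  | cons a t ih =>
    simp only [List.find?_cons, h a (by simp)]
    cases q a <;> simp [ih (fun x hx => h x (by simp [hx]))]

-- the running-best fold over t starting at best = b (with best_len = f b)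
-- equals the first element of b :: t achieving the maximum of f over b :: t
theorem fold_best_eq_find {f : String → Int} :
    ∀ (t : List String) (b : String),
      (t.foldl (fun acc k => if f k > acc.2 then (some k, f k) else acc) (some b, f b)).1
        = (b :: t).find? (fun x => f x == (t.map f).foldl max (f b)) := by
  intro t
  induction t with
  | nil =>
    intro b
    simp only [List.foldl_nil, List.map_nil, List.find?_cons, beq_self_eq_true]
  | cons k t' ih =>
    intro b
    by_cases hk : f k > f b
    · have hmax : max (f b) (f k) = f k := by omega
      have hM : f b < (t'.map f).foldl max (f k) :=
        lt_of_lt_of_le hk (PySem.List.le_foldl_max (t'.map f) (f k)).1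
      simp only [List.foldl_cons, List.map_cons, if_pos hk, hmax, ih k]
      conv_rhs => rw [List.find?_cons_of_neg (by simp only [beq_iff_eq]; omega)]
    · have hk' : f k ≤ f b := by omega
      have hmax : max (f b) (f k) = f b := by omega
      simp only [List.foldl_cons, List.map_cons, if_neg hk, hmax, ih b]
      by_cases hb : f b = (t'.map f).foldl max (f b)
      · conv_lhs => rw [List.find?_cons_of_pos (by simp only [beq_iff_eq]; omega)]
        conv_rhs => rw [List.find?_cons_of_pos (by simp only [beq_iff_eq]; omega)]
      · have hbM : f b < (t'.map f).foldl max (f b) :=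
          lt_of_le_of_ne (PySem.List.le_foldl_max (t'.map f) (f b)).1 hb
        conv_lhs => rw [List.find?_cons_of_neg (by simp only [beq_iff_eq]; omega)]
        conv_rhs => rw [List.find?_cons_of_neg (by simp only [beq_iff_eq]; omega)]
        conv_rhs => rw [List.find?_cons_of_neg (by simp only [beq_iff_eq]; omega)]

theorem fold_best_fst_isSome {f : String → Int} :
    ∀ (t : List String) (b : String) (bl : Int),
      ((t.foldl (fun acc k => if f k > acc.2 then (some k, f k) else acc) (some b, bl)).1).isSome := by
  intro t
  induction t with
  | nil => intro b bl; rfl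
  | cons k t' ih =>
    intro b bl
    simp only [List.foldl_cons]
    by_cases h : f k > bl
    · simp only [if_pos h]; exact ih k (f k)
    · simp only [if_neg h]; exact ih b bl

theorem keys_ofList_biggest (ps : List (String × List Int)) :
    (PySem.Dict.ofList ps).keys = PySem.Set.ofList (ps.map Prod.fst) := by
  show (PySem.Dict.empty.update ps).keys = _
  unfold PySem.Dict.update
  rw [show (fun (d : PySem.Dict String (List Int)) (p : String × List Int) => d.insert p.1 p.2)
      = (fun d p => d.insert ((fun q : String × List Int => q.1) p) ((fun _ (q : String × List Int) => q.2) d p)) from rfl]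
  rw [PySem.Dict.keys_foldl_insert_key]
  simp [PySem.Dict.keys_empty, PySem.Set.update_nil_left]

-- the two ports, stated over the converted dict argument
theorem biggest_eq_alt_of_dict (d : PySem.Dict String (List Int))
    (hnd : d.keys.Nodup) (hne : d.keys ≠ []) :
    (match PySem.List.max?
        (d.keys.foldl (fun ld k => ld.insert k ((d.getD k []).length : Int)) PySem.Dict.empty).values
        (fun v => v) with
      | none => ""
      | some val =>
        match (d.keys.foldl (fun ld k => ld.insert k ((d.getD k []).length : Int)) PySem.Dict.empty).keys.find?
            (fun k => (d.keys.foldl (fun ld k => ld.insert k ((d.getD k []).length : Int)) PySem.Dict.empty).getD k 0 == val) with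
        | some k => k
        | none => "")
    = ((d.keys.foldl (fun acc k =>
          if ((d.getD k []).length : Int) > acc.2 then (some k, ((d.getD k []).length : Int)) else acc)
          ((none : Option String), (-1 : Int))).1).getD "" := by
  set f : String → Int := fun k => ((d.getD k []).length : Int) with hf
  set lenDict := d.keys.foldl (fun ld k => ld.insert k (f k)) PySem.Dict.empty with hld
  have hitems : lenDict.items = d.keys.map (fun k => (k, f k)) := by
    rw [hld]
    have := PySem.Dict.items_foldl_insert_fresh d.keys (fun k => k) f PySem.Dict.empty
      (fun a _ => PySem.Dict.contains_empty a) (by simpa using hnd)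
    simpa using this
  have hkeys : lenDict.keys = d.keys := by
    simp [PySem.Dict.keys, hitems]
  have hvals : lenDict.values = d.keys.map f := by
    simp [PySem.Dict.values, hitems]
  have hndl : lenDict.keys.Nodup := by rw [hkeys]; exact hnd
  have hgetD : ∀ k ∈ d.keys, lenDict.getD k 0 = f k := by
    intro k hk
    exact PySem.Dict.getD_of_mem_items lenDict (by rw [hitems]; exact List.mem_map_of_mem hk) hndl 0
  obtain ⟨c, t, hct⟩ := List.exists_cons_of_ne_nil hne
  have hmax : PySem.List.max? lenDict.values (fun v => v)
      = some ((t.map f).foldl max (f c)) := by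
    rw [hvals, hct, List.map_cons, PySem.List.max?_id_cons]
  rw [hmax]
  show (match lenDict.keys.find? (fun k => lenDict.getD k 0 == (t.map f).foldl max (f c)) with
      | some k => k
      | none => "")
    = ((d.keys.foldl (fun acc k => if f k > acc.2 then (some k, f k) else acc)
        ((none : Option String), (-1 : Int))).1).getD ""
  have hfind : lenDict.keys.find? (fun k => lenDict.getD k 0 == ((t.map f).foldl max (f c)))
      = d.keys.find? (fun k => f k == ((t.map f).foldl max (f c))) := by
    rw [hkeys]
    exact find?_congr_mem _ _ _ (fun x hx => by rw [hgetD x hx])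
  have hstep0 : f c > (-1 : Int) := by
    have : (0 : Int) ≤ f c := Int.natCast_nonneg _
    omega
  have hfold : (d.keys.foldl (fun acc k => if f k > acc.2 then (some k, f k) else acc)
        ((none : Option String), (-1 : Int)))
      = t.foldl (fun acc k => if f k > acc.2 then (some k, f k) else acc) (some c, f c) := by
    rw [hct, List.foldl_cons, if_pos hstep0]
  have hG := fold_best_eq_find (f := f) t c
  have hsome := fold_best_fst_isSome (f := f) t c (f c)
  rw [hfind, hfold, hct, ← hG]
  obtain ⟨x, hx⟩ := Option.isSome_iff_exists.mp hsome
  rw [hx]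
  simp

-- ===== VERDICT (by name: the statement is the Claim_ definition above) =====
theorem biggest_spec : Claim_equal_biggest := by
  intro aDict _ hpre
  have hnd : (PySem.Dict.ofList aDict).keys.Nodup := PySem.Dict.nodup_keys_ofList aDict
  have hne : (PySem.Dict.ofList aDict).keys ≠ [] := by
    cases aDict with
    | nil => exact absurd rfl hpre
    | cons p rest =>
      intro hkeys
      have : p.1 ∈ (PySem.Dict.ofList (p :: rest)).keys := by
        rw [keys_ofList_biggest]
        rw [PySem.Set.mem_ofList]
        simp
      rw [hkeys] at this
      exact absurd this (List.not_mem_nil)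
  exact biggest_eq_alt_of_dict (PySem.Dict.ofList aDict) hnd hne
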